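-- pv_equiv track=rewrite | github.com/deeppavlov/h-elmo | one_str_lm_iterator.py | _shift_cursors
-- ===== SOURCE A (Python) =====
-- def _shift_cursors(cursors, data_len, d=1):
--     cs = list()
--     for c in cursors:
--         c += d
--         while c >= data_len:
--             c -= data_len
--         while c < 0:
--             c += data_len
--         cs.append(c)
--     return cs
-- ===== SOURCE B (Python) =====
-- def _shift_cursors(cursors, data_len, d=1):
--     return [(c + d) % data_len for c in cursors]
-- ===== Notes on version B (the rewrite author's own statement) =====
-- stated objective: idiomatic
-- what changed: Replaces the two per-element while-loop normalisation passes with a single closed-form modulo in a list comprehension.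
import Mathlib
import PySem

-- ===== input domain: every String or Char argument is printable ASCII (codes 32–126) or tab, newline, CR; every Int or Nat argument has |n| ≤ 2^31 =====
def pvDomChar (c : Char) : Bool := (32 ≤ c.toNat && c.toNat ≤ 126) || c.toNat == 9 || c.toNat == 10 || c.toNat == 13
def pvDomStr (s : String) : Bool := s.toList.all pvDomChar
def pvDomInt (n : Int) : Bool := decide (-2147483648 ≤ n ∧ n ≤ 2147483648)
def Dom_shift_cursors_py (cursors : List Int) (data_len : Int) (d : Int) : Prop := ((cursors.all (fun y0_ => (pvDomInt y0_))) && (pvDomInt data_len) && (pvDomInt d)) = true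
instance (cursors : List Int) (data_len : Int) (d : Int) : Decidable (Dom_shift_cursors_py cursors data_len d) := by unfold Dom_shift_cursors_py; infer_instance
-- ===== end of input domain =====

-- B replaces A's two per-element while-loop wrapping passes by one closed-form modulo (idiomatic).

-- ===== PORT A =====
-- 'while c >= data_len: c -= data_len'; the '0 < dl' conjunct is a totality guard only
-- (on Pre_ inputs it always holds; for dl ≤ 0 the Python loop does not terminate).
def pvWhileSub (c dl : Int) : Int :=
  if _h : dl ≤ c ∧ 0 < dl then pvWhileSub (c - dl) dl else c
termination_by c.toNat
decreasing_by omega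

-- 'while c < 0: c += data_len'; same totality guard.
def pvWhileAdd (c dl : Int) : Int :=
  if _h : c < 0 ∧ 0 < dl then pvWhileAdd (c + dl) dl else c
termination_by (-c).toNat
decreasing_by omega

def shift_cursors_py (cursors : List Int) (data_len : Int) (d : Int) : List Int :=
  cursors.foldl (fun cs c => cs ++ [pvWhileAdd (pvWhileSub (c + d) data_len) data_len]) []

-- ===== PORT B =====
def shift_cursors_py_alt (cursors : List Int) (data_len : Int) (d : Int) : List Int :=
  cursors.map (fun c => PySem.Int.mod (c + d) data_len)

-- ===== PRECONDITION & SPEC =====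
-- Pre_ excludes data_len ≤ 0 with nonempty cursors: there A's while loops never terminate
-- (A returns no value), and B raises ZeroDivisionError at data_len = 0.
def Pre_shift_cursors_py (cursors : List Int) (data_len : Int) (_d : Int) : Prop :=
  0 < data_len ∨ cursors = []
instance (cursors : List Int) (data_len : Int) (d : Int) : Decidable (Pre_shift_cursors_py cursors data_len d) := by unfold Pre_shift_cursors_py; infer_instance

def pvWitness_shift_cursors_py : List Int × Int × Int := ([0, 5, -3], 4, 1)

def Spec_shift_cursors_py (cursors : List Int) (data_len : Int) (d : Int) (out : List Int) : Prop := out = shift_cursors_py_alt cursors data_len d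
instance (cursors : List Int) (data_len : Int) (d : Int) (out : List Int) : Decidable (Spec_shift_cursors_py cursors data_len d out) := by unfold Spec_shift_cursors_py; infer_instance

-- ===== CLAIM (what is proved, stated in full; the proofs are below) =====
def Claim_equal_shift_cursors_py : Prop := ∀ (cursors : List Int) (data_len : Int) (d : Int), Dom_shift_cursors_py cursors data_len d → Pre_shift_cursors_py cursors data_len d → Spec_shift_cursors_py cursors data_len d (shift_cursors_py cursors data_len d)

-- ===== LEMMAS AND PROOFS =====

theorem pvWhileSub_spec (c dl : Int) (h : 0 < dl) :
    pvWhileSub c dl < dl ∧ pvWhileSub c dl % dl = c % dl := by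
  rw [pvWhileSub]
  split
  · rename_i hg
    obtain ⟨h1, h2⟩ := pvWhileSub_spec (c - dl) dl h
    exact ⟨h1, by rw [h2, Int.sub_emod_right]⟩
  · exact ⟨by omega, rfl⟩
termination_by c.toNat
decreasing_by omega

theorem pvWhileAdd_spec (c dl : Int) (h : 0 < dl) (hlt : c < dl) :
    0 ≤ pvWhileAdd c dl ∧ pvWhileAdd c dl < dl ∧ pvWhileAdd c dl % dl = c % dl := by
  rw [pvWhileAdd]
  split
  · rename_i hg
    obtain ⟨h1, h2, h3⟩ := pvWhileAdd_spec (c + dl) dl h (by omega)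
    exact ⟨h1, h2, by rw [h3, Int.add_emod_right]⟩
  · exact ⟨by omega, hlt, rfl⟩
termination_by (-c).toNat
decreasing_by omega

theorem pvWrap_eq_mod (x dl : Int) (h : 0 < dl) :
    pvWhileAdd (pvWhileSub x dl) dl = PySem.Int.mod x dl := by
  obtain ⟨hs1, hs2⟩ := pvWhileSub_spec x dl h
  obtain ⟨h1, h2, h3⟩ := pvWhileAdd_spec (pvWhileSub x dl) dl h hs1
  rw [PySem.Int.mod_eq_emod_of_pos h]
  have := Int.emod_eq_of_lt h1 h2
  rw [← this, h3, hs2]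

-- ===== VERDICT (by name: the statement is the Claim_ definition above) =====
theorem shift_cursors_py_spec : Claim_equal_shift_cursors_py := by
  intro cursors data_len d _ hpre
  unfold Spec_shift_cursors_py shift_cursors_py shift_cursors_py_alt
  rcases hpre with hpos | hnil
  · rw [PySem.List.foldl_append_singleton_eq_map]
    exact List.map_congr_left (fun c _ => pvWrap_eq_mod (c + d) data_len hpos)
  · subst hnil; rfl
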